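-- pv_equiv track=rewrite | github.com/yps1978/yps1978 | dev/recursion/encrypted_words.py | findEncryptedWord
-- ===== SOURCE A (Python) =====
-- def findEncryptedWord(s):
--     str_len = len(s)
--
--     if str_len == 0:
--         return ''
--
--     if str_len == 1:
--         return s
--
--     mid_ix = (str_len // 2) - 1 if str_len % 2 == 0 else str_len // 2
--
--     return s[mid_ix] + findEncryptedWord(s[:mid_ix]) + findEncryptedWord(s[mid_ix + 1:])
-- ===== SOURCE B (Python) =====
-- def findEncryptedWord(s):
--     buf = []
--     stack = [(0, len(s))]
--     while stack:
--         lo, hi = stack.pop()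
--         if lo >= hi:
--             continue
--         length = hi - lo
--         mid = (length // 2) - 1 if length % 2 == 0 else length // 2
--         m = lo + mid
--         buf.append(s[m])
--         stack.append((m + 1, hi))
--         stack.append((lo, m))
--     return ''.join(buf)
-- ===== Notes on version B (the rewrite author's own statement) =====
-- stated objective: alternative
-- what changed: Replaced the recursion with an iterative loop over an explicit stack of (lo,hi) index ranges into s, appending characters to a buffer, which also removes the per-call string slicing.
import Mathlib
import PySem

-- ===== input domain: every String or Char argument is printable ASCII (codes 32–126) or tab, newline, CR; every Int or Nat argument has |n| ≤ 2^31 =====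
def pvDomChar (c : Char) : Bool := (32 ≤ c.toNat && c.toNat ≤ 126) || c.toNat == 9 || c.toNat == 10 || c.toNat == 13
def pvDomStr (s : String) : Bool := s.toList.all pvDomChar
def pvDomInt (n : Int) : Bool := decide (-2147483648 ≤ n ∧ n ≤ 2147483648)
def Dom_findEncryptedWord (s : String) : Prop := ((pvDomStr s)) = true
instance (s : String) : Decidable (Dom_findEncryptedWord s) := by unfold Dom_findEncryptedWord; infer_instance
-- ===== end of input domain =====

-- B replaces A's recursion (which slices the string at every call) by an iterative loop over an
-- explicit stack of (lo,hi) index ranges, appending characters into a buffer; same output.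
-- Both ports carry a Nat fuel that only makes the recursion structural (it is always sufficient
-- at the call site); it changes nothing about the computation.

-- ===== PORT A =====
-- A's recursion on the list of characters; s[:mid] / s[mid+1:] are take mid / drop (mid+1)
-- (exact here: 0 ≤ mid < length), and s[mid] is getD mid (exact: mid < length).
-- Fuel l.length suffices: every recursive call strictly shrinks the list.
def findEncryptedWordAuxA : Nat → List Char → List Char
  | 0, _ => []
  | fuel + 1, l =>
    if l.length = 0 then []
    else if l.length = 1 then l
    else
      let mid := if l.length % 2 = 0 then l.length / 2 - 1 else l.length / 2
      l.getD mid ' ' :: (findEncryptedWordAuxA fuel (l.take mid)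
        ++ findEncryptedWordAuxA fuel (l.drop (mid + 1)))

def findEncryptedWord (s : String) : String :=
  String.ofList (findEncryptedWordAuxA s.toList.length s.toList)

-- ===== PORT B =====
-- Explicit stack of (lo,hi) index ranges (head of the list = top of the stack), buffer of chars;
-- s[m] is getD m (exact: m < length on every range the loop ever holds).
-- Fuel 2*length+1 suffices: each iteration strictly shrinks the sum of (2*(hi-lo)+1) over the stack.
def findEncryptedWordAuxB (cs : List Char) : Nat → List (Nat × Nat) → List Char → List Char
  | 0, _, buf => buf
  | _ + 1, [], buf => buf
  | fuel + 1, (lo, hi) :: rest, buf =>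
    if lo ≥ hi then findEncryptedWordAuxB cs fuel rest buf
    else
      let len := hi - lo
      let mid := if len % 2 = 0 then len / 2 - 1 else len / 2
      let m := lo + mid
      findEncryptedWordAuxB cs fuel ((lo, m) :: (m + 1, hi) :: rest) (buf ++ [cs.getD m ' '])

def findEncryptedWord_alt (s : String) : String :=
  String.ofList (findEncryptedWordAuxB s.toList (2 * s.toList.length + 1)
    [(0, s.toList.length)] [])

-- ===== PRECONDITION & SPEC =====
def Spec_findEncryptedWord (s : String) (out : String) : Prop := out = findEncryptedWord_alt s
instance (s : String) (out : String) : Decidable (Spec_findEncryptedWord s out) := by unfold Spec_findEncryptedWord; infer_instance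

-- ===== CLAIM (what is proved, stated in full; the proofs are below) =====
def Claim_equal_findEncryptedWord : Prop := ∀ (s : String), Dom_findEncryptedWord s → Spec_findEncryptedWord s (findEncryptedWord s)

-- ===== LEMMAS AND PROOFS =====

-- A's value, independent of (sufficient) fuel
def pvA (l : List Char) : List Char := findEncryptedWordAuxA l.length l

theorem auxA_succ (f : Nat) (l : List Char) :
    findEncryptedWordAuxA (f + 1) l
      = if l.length = 0 then []
        else if l.length = 1 then l
        else
          l.getD (if l.length % 2 = 0 then l.length / 2 - 1 else l.length / 2) ' ' ::
            (findEncryptedWordAuxA f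
                (l.take (if l.length % 2 = 0 then l.length / 2 - 1 else l.length / 2))
              ++ findEncryptedWordAuxA f
                (l.drop ((if l.length % 2 = 0 then l.length / 2 - 1 else l.length / 2) + 1))) := rfl

theorem auxA_zero_len (f : Nat) (l : List Char) (h : l.length = 0) :
    findEncryptedWordAuxA f l = [] := by
  cases f with
  | zero => rfl
  | succ f => rw [findEncryptedWordAuxA, if_pos h]

theorem auxA_fuel_irrel (f : Nat) : ∀ (f' : Nat) (l : List Char),
    l.length ≤ f → l.length ≤ f' → findEncryptedWordAuxA f l = findEncryptedWordAuxA f' l := by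
  induction f with
  | zero =>
    intro f' l h _
    rw [auxA_zero_len 0 l (by omega), auxA_zero_len f' l (by omega)]
  | succ f ih =>
    intro f' l h h'
    by_cases h0 : l.length = 0
    · rw [auxA_zero_len _ l h0, auxA_zero_len f' l h0]
    · obtain ⟨f'', rfl⟩ : ∃ f'', f' = f'' + 1 := ⟨f' - 1, by omega⟩
      rw [auxA_succ, auxA_succ]
      by_cases h1 : l.length = 1
      · rw [if_neg h0, if_pos h1, if_neg h0, if_pos h1]
      · rw [if_neg h0, if_neg h1, if_neg h0, if_neg h1]
        have hmid : (if l.length % 2 = 0 then l.length / 2 - 1 else l.length / 2) < l.length := by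
          split <;> omega
        set M := if l.length % 2 = 0 then l.length / 2 - 1 else l.length / 2 with hM
        rw [ih f'' (l.take M) (by rw [List.length_take]; omega) (by rw [List.length_take]; omega),
            ih f'' (l.drop (M + 1)) (by rw [List.length_drop]; omega) (by rw [List.length_drop]; omega)]

theorem auxA_eq_pvA (f : Nat) (l : List Char) (h : l.length ≤ f) :
    findEncryptedWordAuxA f l = pvA l :=
  auxA_fuel_irrel f l.length l h le_rfl

theorem pvA_nil : pvA [] = [] := rfl

theorem pvA_singleton (c : Char) : pvA [c] = [c] := by
  have h : pvA [c] = findEncryptedWordAuxA 1 [c] := rfl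
  rw [h, auxA_succ]
  simp

-- the sub-list of cs described by a range (lo,hi)
def pvSlice (cs : List Char) (lo hi : Nat) : List Char := (cs.drop lo).take (hi - lo)

theorem pvSlice_len (cs : List Char) (lo hi : Nat) (h : hi ≤ cs.length) :
    (pvSlice cs lo hi).length = hi - lo := by
  simp [pvSlice]; omega

theorem pvSlice_empty (cs : List Char) (lo hi : Nat) (h : hi ≤ lo) : pvSlice cs lo hi = [] := by
  unfold pvSlice
  have : hi - lo = 0 := by omega
  simp [this]

theorem pvSlice_getD (cs : List Char) (lo hi k : Nat) (h : hi ≤ cs.length) (hk : k < hi - lo) :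
    (pvSlice cs lo hi).getD k ' ' = cs.getD (lo + k) ' ' := by
  have h1 : k < (pvSlice cs lo hi).length := by rw [pvSlice_len cs lo hi h]; omega
  have h2 : lo + k < cs.length := by omega
  rw [List.getD_eq_getElem _ _ h1, List.getD_eq_getElem _ _ h2]
  simp [pvSlice]

theorem pvSlice_take (cs : List Char) (lo hi mid : Nat) (h : mid ≤ hi - lo) :
    (pvSlice cs lo hi).take mid = pvSlice cs lo (lo + mid) := by
  unfold pvSlice
  rw [List.take_take]
  congr 1
  omega

theorem pvSlice_drop (cs : List Char) (lo hi k : Nat) :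
    (pvSlice cs lo hi).drop k = pvSlice cs (lo + k) hi := by
  unfold pvSlice
  rw [List.drop_take, List.drop_drop]
  congr 1
  omega

-- A's value on a range splits as: middle char, then the left range, then the right range
theorem pvA_split (cs : List Char) (lo hi mid : Nat) (hhi : hi ≤ cs.length) (hlt : lo < hi)
    (hm : mid = if (hi - lo) % 2 = 0 then (hi - lo) / 2 - 1 else (hi - lo) / 2) :
    pvA (pvSlice cs lo hi)
      = cs.getD (lo + mid) ' ' ::
        (pvA (pvSlice cs lo (lo + mid)) ++ pvA (pvSlice cs (lo + mid + 1) hi)) := by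
  have hn : (pvSlice cs lo hi).length = hi - lo := pvSlice_len cs lo hi hhi
  have hmid : mid < hi - lo := by subst hm; split <;> omega
  by_cases h1 : hi - lo = 1
  · have hm0 : mid = 0 := by omega
    have hlo : lo < cs.length := by omega
    have hsl : pvSlice cs lo hi = [cs.getD lo ' '] := by
      unfold pvSlice
      rw [h1, List.drop_eq_getElem_cons hlo]
      simp only [List.take_succ_cons, List.take_zero, List.getD,
        List.getElem?_eq_getElem hlo, Option.getD_some]
    rw [hsl, pvA_singleton, hm0, Nat.add_zero, pvSlice_empty cs lo lo le_rfl,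
        pvSlice_empty cs (lo + 1) hi (by omega), pvA_nil]
    simp
  · have hn2 : 2 ≤ hi - lo := by omega
    obtain ⟨k, hk⟩ : ∃ k, (pvSlice cs lo hi).length = k + 1 := ⟨hi - lo - 1, by omega⟩
    unfold pvA
    rw [hk, auxA_succ]
    rw [if_neg (by omega), if_neg (by omega)]
    have hmid_eq : (if (pvSlice cs lo hi).length % 2 = 0 then (pvSlice cs lo hi).length / 2 - 1
        else (pvSlice cs lo hi).length / 2) = mid := by rw [hn, hm]
    simp only [hmid_eq]
    congr 1
    · exact pvSlice_getD cs lo hi mid hhi hmid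
    congr 1
    · rw [pvSlice_take cs lo hi mid (by omega)]
      exact auxA_eq_pvA k _ (by rw [pvSlice_len cs lo (lo + mid) (by omega)]; omega)
    · rw [pvSlice_drop cs lo hi (mid + 1), Nat.add_assoc]
      exact auxA_eq_pvA k _ (by rw [pvSlice_len cs (lo + (mid + 1)) hi hhi]; omega)

-- total work left on the stack: each iteration strictly decreases it
def pvMeasure (stack : List (Nat × Nat)) : Nat :=
  (stack.map (fun p => 2 * (p.2 - p.1) + 1)).sum

-- loop invariant: the loop's value = buffer ++ A's value on each remaining range, left to right
theorem auxB_invariant (cs : List Char) (fuel : Nat) : ∀ (stack : List (Nat × Nat)) (buf : List Char),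
    (∀ p ∈ stack, p.2 ≤ cs.length) → pvMeasure stack ≤ fuel →
    findEncryptedWordAuxB cs fuel stack buf
      = buf ++ (stack.map (fun p => pvA (pvSlice cs p.1 p.2))).flatten := by
  induction fuel with
  | zero =>
    intro stack buf _ hf
    cases stack with
    | nil => simp [findEncryptedWordAuxB]
    | cons p rest => simp [pvMeasure] at hf
  | succ fuel ih =>
    intro stack buf hb hf
    cases stack with
    | nil => simp [findEncryptedWordAuxB]
    | cons p rest =>
      obtain ⟨lo, hi⟩ := p
      rw [findEncryptedWordAuxB]
      by_cases h : lo ≥ hi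
      · rw [if_pos h, ih rest buf (fun q hq => hb q (List.mem_cons_of_mem _ hq))
            (by simp [pvMeasure] at hf ⊢; omega)]
        rw [List.map_cons, List.flatten_cons, pvSlice_empty cs lo hi h, pvA_nil,
            List.nil_append]
      · rw [if_neg h]
        have hhi : hi ≤ cs.length := hb (lo, hi) List.mem_cons_self
        have hlt : lo < hi := by omega
        have hm' : (if (hi - lo) % 2 = 0 then (hi - lo) / 2 - 1 else (hi - lo) / 2)
            = if (hi - lo) % 2 = 0 then (hi - lo) / 2 - 1 else (hi - lo) / 2 := rfl
        set mid := if (hi - lo) % 2 = 0 then (hi - lo) / 2 - 1 else (hi - lo) / 2 with hmdef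
        have hmlt : mid < hi - lo := by rw [hmdef]; split <;> omega
        rw [ih ((lo, lo + mid) :: (lo + mid + 1, hi) :: rest) (buf ++ [cs.getD (lo + mid) ' '])]
        · simp only [List.map_cons, List.flatten_cons]
          rw [pvA_split cs lo hi mid hhi hlt hmdef]
          simp [List.append_assoc]
        · intro q hq
          simp only [List.mem_cons] at hq
          rcases hq with rfl | rfl | hq
          · simp only; omega
          · exact hhi
          · exact hb q (List.mem_cons_of_mem _ hq)
        · simp only [pvMeasure, List.map_cons, List.sum_cons] at hf ⊢
          omega

-- ===== VERDICT (by name: the statement is the Claim_ definition above) =====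
theorem findEncryptedWord_spec : Claim_equal_findEncryptedWord := by
  intro s _
  unfold Spec_findEncryptedWord findEncryptedWord findEncryptedWord_alt
  rw [auxB_invariant s.toList (2 * s.toList.length + 1) [(0, s.toList.length)] []
      (by simp) (by simp [pvMeasure])]
  have hfull : pvSlice s.toList 0 s.toList.length = s.toList := by
    unfold pvSlice; simp
  simp only [List.map_cons, List.map_nil, List.flatten_cons, List.flatten_nil,
    List.nil_append, List.append_nil, hfull]
  rfl
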